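-- pv_equiv track=rewrite | github.com/shriramt124/Ecommerce-listing-automation | listing_generator/content_agents.py | _fallback_chain
-- ===== SOURCE A (Python) =====
-- from typing import Any, Dict, List, Optional
--
-- def _fallback_chain(
--     sorted_kw: List[Dict[str, Any]], max_chars: int,
-- ) -> str:
--     """Fallback: chain top keyword phrases directly, keeping meaningful groups."""
--     chain_parts: List[str] = []
--     current_len = 0
--
--     for kw in sorted_kw:
--         phrase = str(kw.get('keyword', '')).strip().lower()
--         phrase = ''.join(c if c.isalnum() or c == ' ' else ' ' for c in phrase)
--         phrase = ' '.join(phrase.split())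
--         if not phrase:
--             continue
--
--         test_len = current_len + len(phrase) + (1 if chain_parts else 0)
--         if test_len > max_chars:
--             break
--
--         chain_parts.append(phrase)
--         current_len = test_len
--
--     return ' '.join(chain_parts)
-- ===== SOURCE B (Python) =====
-- from typing import Any, Dict, List
--
-- def _fallback_chain(
--     sorted_kw: List[Dict[str, Any]], max_chars: int,
-- ) -> str:
--     """Normalize all phrases first, then count how many prefix phrases fit."""
--     phrases = []
--     for kw in sorted_kw:
--         p = str(kw.get('keyword', '')).strip().lower()
--         p = ''.join(c if c.isalnum() or c == ' ' else ' ' for c in p)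
--         p = ' '.join(p.split())
--         if p:
--             phrases.append(p)
--     count = 0
--     total = 0
--     for p in phrases:
--         total += len(p)
--         if count + total > max_chars:
--             break
--         count += 1
--     return ' '.join(phrases[:count])
-- ===== Notes on version B (the rewrite author's own statement) =====
-- stated objective: simpler
-- what changed: Splits A's fused accumulate-and-break loop into a normalize-and-filter pass followed by a prefix-count loop over phrase lengths (separators counted via the number of phrases already taken), returning the join of the counted prefix.
import Mathlib
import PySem

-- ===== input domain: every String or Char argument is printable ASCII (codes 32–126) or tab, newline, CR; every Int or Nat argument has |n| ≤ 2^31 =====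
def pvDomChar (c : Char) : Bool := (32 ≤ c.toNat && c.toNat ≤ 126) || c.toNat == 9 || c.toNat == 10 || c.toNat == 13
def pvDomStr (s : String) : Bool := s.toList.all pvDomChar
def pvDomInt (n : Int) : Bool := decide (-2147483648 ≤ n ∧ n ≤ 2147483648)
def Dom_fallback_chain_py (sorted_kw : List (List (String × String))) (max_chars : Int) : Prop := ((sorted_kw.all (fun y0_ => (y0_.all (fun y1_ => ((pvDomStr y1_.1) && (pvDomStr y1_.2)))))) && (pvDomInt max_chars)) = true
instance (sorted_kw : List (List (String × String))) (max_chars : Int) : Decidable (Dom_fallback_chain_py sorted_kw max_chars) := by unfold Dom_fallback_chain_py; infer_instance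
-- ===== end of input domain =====

-- B re-decomposes A's fused accumulate-and-break loop into a normalize pass plus a prefix-count
-- loop; objective: simpler (same cost, no speed claim).

-- ===== PORT A =====
-- shared normalization (identical code in both Pythons):
-- str(kw.get('keyword','')).strip().lower(); map non-alnum-non-space chars to ' '; ' '.join(split())
def pvNormalize (kw : List (String × String)) : String :=
  let phrase := PySem.Str.lower (PySem.Str.strip (PySem.Dict.getD (PySem.Dict.mk kw) "keyword" ""))
  let phrase := String.ofList (phrase.toList.map (fun c => if PySem.Chars.isalnum c || c = ' ' then c else ' '))
  PySem.Str.join " " (PySem.Str.split₀ phrase)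

-- A's for-loop with break, state = (chain_parts, current_len)
def pvChainLoopA (kws : List (List (String × String))) (max_chars : Int)
    (parts : List String) (cur : Int) : List String :=
  match kws with
  | [] => parts
  | kw :: rest =>
    let phrase := pvNormalize kw
    if phrase = "" then pvChainLoopA rest max_chars parts cur
    else
      let test := cur + PySem.Str.len phrase + (if parts.isEmpty then 0 else 1)
      if test > max_chars then parts
      else pvChainLoopA rest max_chars (parts ++ [phrase]) test

def fallback_chain_py (sorted_kw : List (List (String × String))) (max_chars : Int) : String :=
  PySem.Str.join " " (pvChainLoopA sorted_kw max_chars [] 0)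

-- ===== PORT B =====
-- first pass of Source B: collect the non-empty normalized phrases
def pvNormAll (kws : List (List (String × String))) : List String :=
  kws.foldl (fun acc kw => let p := pvNormalize kw; if p = "" then acc else acc ++ [p]) []

-- second pass of Source B: count how many prefix phrases fit (break ⇒ recursion)
def pvCountLoopB (ps : List String) (max_chars : Int) (count total : Int) : Int :=
  match ps with
  | [] => count
  | p :: rest =>
    let total := total + PySem.Str.len p
    if count + total > max_chars then count
    else pvCountLoopB rest max_chars (count + 1) total

def fallback_chain_py_alt (sorted_kw : List (List (String × String))) (max_chars : Int) : String :=
  let phrases := pvNormAll sorted_kw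
  let count := pvCountLoopB phrases max_chars 0 0
  PySem.Str.join " " (PySem.List.slice phrases none (some count))

-- ===== PRECONDITION & SPEC =====
def Spec_fallback_chain_py (sorted_kw : List (List (String × String))) (max_chars : Int) (out : String) : Prop := out = fallback_chain_py_alt sorted_kw max_chars
instance (sorted_kw : List (List (String × String))) (max_chars : Int) (out : String) : Decidable (Spec_fallback_chain_py sorted_kw max_chars out) := by unfold Spec_fallback_chain_py; infer_instance

-- ===== CLAIM (what is proved, stated in full; the proofs are below) =====
def Claim_equal_fallback_chain_py : Prop := ∀ (sorted_kw : List (List (String × String))) (max_chars : Int), Dom_fallback_chain_py sorted_kw max_chars → Spec_fallback_chain_py sorted_kw max_chars (fallback_chain_py sorted_kw max_chars)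

-- ===== LEMMAS AND PROOFS =====

-- the greedy prefix of phrases, parametrised by phrases-taken-so-far c and chars-so-far t
def pvTakeG (ps : List String) (m : Int) (c t : Int) : List String :=
  match ps with
  | [] => []
  | p :: rest =>
    if c + (t + PySem.Str.len p) > m then []
    else p :: pvTakeG rest m (c + 1) (t + PySem.Str.len p)

-- same, over the raw keyword list with inline normalization (A's view)
def pvTakeGK (kws : List (List (String × String))) (m : Int) (c t : Int) : List String :=
  match kws with
  | [] => []
  | kw :: rest =>
    let p := pvNormalize kw
    if p = "" then pvTakeGK rest m c t
    else if c + (t + PySem.Str.len p) > m then []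
    else p :: pvTakeGK rest m (c + 1) (t + PySem.Str.len p)

lemma pvNormAll_eq (kws : List (List (String × String))) :
    pvNormAll kws = (kws.filter (fun kw => pvNormalize kw != "")).map pvNormalize := by
  unfold pvNormAll
  have hf : (fun (acc : List String) (kw : List (String × String)) =>
      let p := pvNormalize kw; if p = "" then acc else acc ++ [p])
      = (fun acc kw => if (pvNormalize kw != "") = true then acc ++ [pvNormalize kw] else acc) := by
    funext acc kw
    by_cases h : pvNormalize kw = "" <;> simp [h]
  rw [hf, PySem.List.foldl_append_if]
  simp

lemma pvTakeGK_eq (kws : List (List (String × String))) (m : Int) :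
    ∀ c t, pvTakeGK kws m c t
      = pvTakeG ((kws.filter (fun kw => pvNormalize kw != "")).map pvNormalize) m c t := by
  induction kws with
  | nil => intro c t; rfl
  | cons kw rest ih =>
    intro c t
    by_cases h : pvNormalize kw = ""
    · simp [pvTakeGK, h, ih]
    · simp only [pvTakeGK, h, if_false, List.filter_cons, bne_iff_ne, ne_eq,
        not_false_eq_true, if_true, List.map_cons, pvTakeG]
      split_ifs with h2
      · rfl
      · rw [ih]

lemma pvCountLoopB_le (ps : List String) (m : Int) :
    ∀ c t, c ≤ pvCountLoopB ps m c t := by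
  induction ps with
  | nil => intro c t; simp [pvCountLoopB]
  | cons p rest ih =>
    intro c t
    simp only [pvCountLoopB]
    split_ifs
    · exact le_refl c
    · exact le_trans (by omega) (ih (c + 1) (t + PySem.Str.len p))

lemma pvTake_countLoopB (ps : List String) (m : Int) :
    ∀ c t, List.take ((pvCountLoopB ps m c t - c).toNat) ps = pvTakeG ps m c t := by
  induction ps with
  | nil => intro c t; simp [pvTakeG]
  | cons p rest ih =>
    intro c t
    simp only [pvCountLoopB, pvTakeG]
    split_ifs with h
    · simp
    · have hle := pvCountLoopB_le rest m (c + 1) (t + PySem.Str.len p)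
      have : (pvCountLoopB rest m (c + 1) (t + PySem.Str.len p) - c).toNat
          = (pvCountLoopB rest m (c + 1) (t + PySem.Str.len p) - (c + 1)).toNat + 1 := by omega
      rw [this, List.take_succ_cons, ih]

lemma pvChainLoopA_eq (kws : List (List (String × String))) (m : Int) :
    ∀ (parts : List String) (t : Int),
      pvChainLoopA kws m parts (t + (if parts.isEmpty then 0 else (parts.length : Int) - 1))
        = parts ++ pvTakeGK kws m (parts.length : Int) t := by
  induction kws with
  | nil => intro parts t; simp [pvChainLoopA, pvTakeGK]
  | cons kw rest ih =>
    intro parts t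
    by_cases h : pvNormalize kw = ""
    · simp only [pvChainLoopA, pvTakeGK, h, if_true]
      exact ih parts t
    · simp only [pvChainLoopA, pvTakeGK, h, if_false]
      have hcur : (t + (if parts.isEmpty then 0 else (parts.length : Int) - 1))
          + PySem.Str.len (pvNormalize kw) + (if parts.isEmpty then 0 else 1)
          = (parts.length : Int) + (t + PySem.Str.len (pvNormalize kw)) := by
        by_cases hp : parts.isEmpty
        · have h0 : parts = [] := List.isEmpty_iff.mp hp
          subst h0
          simp only [List.isEmpty_nil, if_true, List.length_nil, Nat.cast_zero]
          ring
        · simp only [hp, if_neg Bool.false_ne_true]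
          ring
      rw [hcur]
      split_ifs with h2
      · simp
      · have hne : ((parts ++ [pvNormalize kw]).isEmpty) = false := by simp
        have h3 := ih (parts ++ [pvNormalize kw]) (t + PySem.Str.len (pvNormalize kw))
        rw [hne] at h3
        simp only [if_neg Bool.false_ne_true, List.length_append, List.length_cons,
          List.length_nil] at h3
        push_cast at h3
        have harg : t + PySem.Str.len (pvNormalize kw) + ((parts.length : Int) + 1 - 1)
            = (parts.length : Int) + (t + PySem.Str.len (pvNormalize kw)) := by ring
        rw [harg] at h3
        rw [h3, List.append_assoc]
        simp only [List.singleton_append]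

-- ===== VERDICT (by name: the statement is the Claim_ definition above) =====
theorem fallback_chain_py_spec : Claim_equal_fallback_chain_py := by
  intro kws m _
  unfold Spec_fallback_chain_py fallback_chain_py fallback_chain_py_alt
  have hA := pvChainLoopA_eq kws m [] 0
  simp only [List.isEmpty_nil, if_true, List.length_nil, Nat.cast_zero, List.nil_append,
    add_zero] at hA
  have hc0 : (0 : Int) ≤ pvCountLoopB (pvNormAll kws) m 0 0 := pvCountLoopB_le _ m 0 0
  rw [hA]
  show PySem.Str.join " " (pvTakeGK kws m 0 0)
      = PySem.Str.join " " (PySem.List.slice (pvNormAll kws) none (some (pvCountLoopB (pvNormAll kws) m 0 0)))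
  rw [PySem.List.slice_to _ hc0]
  have hB := pvTake_countLoopB (pvNormAll kws) m 0 0
  simp only [sub_zero] at hB
  rw [hB, pvTakeGK_eq, pvNormAll_eq]
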